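-- pv_equiv track=rewrite | github.com/sashakmurray/scioly-results | scilympiad_scraper.py | superscore
-- ===== SOURCE A (Python) =====
-- def superscore(data):
--     combined_results = {}
--     for school in data:
--         if (c := ",") in school or (c := ".") in school:
--             school_name = school[:school.rfind(c)]
--             if school_name not in combined_results:
--                 combined_results[school_name] = data[school]
--             else:
--                 for event in combined_results[school_name]:
--                     if data[school][event] < combined_results[school_name][event]:
--                         combined_results[school_name][event] = data[school][event]
--     return combined_results
-- ===== SOURCE B (Python) =====
-- def superscore(data):
--     # Two passes: group the schools by base name first, then build each merged
--     # dict directly as a per-event minimum over the whole group.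
--     # NOTE: unlike the original, this never mutates the caller's inner dicts.
--     groups = {}
--     for school in data:
--         if "," in school:
--             name = school[:school.rfind(",")]
--         elif "." in school:
--             name = school[:school.rfind(".")]
--         else:
--             continue
--         groups.setdefault(name, []).append(school)
--     return {name: {event: min(data[s][event] for s in members)
--                    for event in data[members[0]]}
--             for name, members in groups.items()}
-- ===== Notes on version B (the rewrite author's own statement) =====
-- stated objective: alternative
-- what changed: A makes one pass, merging each later group member into the accumulated dict by in-place strict-less-than updates (aliasing and mutating the caller's inner dicts); B first groups school keys by base name, then builds each merged dict fresh in one comprehension as a per-event minimum over the whole group, never mutating the input.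
import Mathlib
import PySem

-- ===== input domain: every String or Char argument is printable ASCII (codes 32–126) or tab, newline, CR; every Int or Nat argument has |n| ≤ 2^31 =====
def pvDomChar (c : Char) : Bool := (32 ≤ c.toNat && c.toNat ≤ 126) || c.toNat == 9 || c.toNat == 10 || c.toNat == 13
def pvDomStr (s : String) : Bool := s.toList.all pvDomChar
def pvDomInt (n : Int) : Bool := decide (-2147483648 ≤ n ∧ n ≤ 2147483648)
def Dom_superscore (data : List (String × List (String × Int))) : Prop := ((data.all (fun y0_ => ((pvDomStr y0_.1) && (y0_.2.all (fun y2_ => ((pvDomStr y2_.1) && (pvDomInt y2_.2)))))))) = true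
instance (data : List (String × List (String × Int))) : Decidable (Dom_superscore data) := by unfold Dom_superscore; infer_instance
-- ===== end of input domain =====

-- B groups the school keys by base name first and then builds each merged dict
-- fresh as a per-event minimum over the whole group (alternative decomposition;
-- return value only: Python A mutates the caller's inner dicts in place, B does not).


-- ===== PORT A =====
-- shared: the Python argument is a dict[str, dict[str, int]]; under the type
-- convention it arrives as an association list — both ports first realise it as
-- the Python dict it denotes (last value wins, first position kept).
def toDict (data : List (String × List (String × Int))) :
    PySem.Dict String (PySem.Dict String Int) :=
  PySem.Dict.ofList (data.map (fun p => (p.1, PySem.Dict.ofList p.2)))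

-- shared: `if (c := ",") in school or (c := ".") in school: name = school[:school.rfind(c)]`
-- (B's Python spells the same comma-before-period choice as an if/elif chain).
def baseOf (school : String) : Option String :=
  if PySem.Str.isIn "," school then
    some (PySem.Str.slice school none (some (PySem.Str.rfind school ",")))
  else if PySem.Str.isIn "." school then
    some (PySem.Str.slice school none (some (PySem.Str.rfind school ".")))
  else none

-- `for event in combined[name]: if data[school][event] < combined[name][event]: …`
-- (where Python raises KeyError — data[school] lacking the event — the lookup is
-- none and the port skips; those inputs are excluded by Pre_).
def mergeOne (base ev : PySem.Dict String Int) : PySem.Dict String Int :=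
  base.keys.foldl (fun b e =>
    match PySem.Dict.get? ev e, PySem.Dict.get? b e with
    | some v, some w => if v < w then b.insert e v else b
    | _, _ => b) base

def stepA (acc : PySem.Dict String (PySem.Dict String Int))
    (p : String × PySem.Dict String Int) : PySem.Dict String (PySem.Dict String Int) :=
  match baseOf p.1 with
  | none => acc
  | some name =>
    match acc.get? name with
    | none => acc.insert name p.2
    | some base => acc.insert name (mergeOne base p.2)

def superscore (data : List (String × List (String × Int))) : List (String × List (String × Int)) :=
  (((toDict data).items.foldl stepA PySem.Dict.empty).items).map (fun q => (q.1, q.2.items))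

-- ===== PORT B =====
-- `min(data[s][event] for s in members)` as a running minimum over the group
-- (a member without the event is where Python raises KeyError: skipped, excluded
-- by Pre_; the final `.getD 0` is unreachable since members[0] has the event).
def minOver (d : PySem.Dict String (PySem.Dict String Int)) (members : List String)
    (e : String) : Int :=
  (members.foldl (fun m s =>
      match PySem.Dict.get? (PySem.Dict.getD d s PySem.Dict.empty) e with
      | some v => some (match m with | none => v | some m0 => min m0 v)
      | none => m) none).getD 0

-- `{event: min(data[s][event] for s in members) for event in data[members[0]]}`
-- ([] is unreachable: every group collects at least one member).
def bval (d : PySem.Dict String (PySem.Dict String Int)) (members : List String) :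
    PySem.Dict String Int :=
  match members with
  | [] => PySem.Dict.empty
  | first :: _ =>
    (PySem.Dict.getD d first PySem.Dict.empty).keys.foldl
      (fun out e => out.insert e (minOver d members e)) PySem.Dict.empty

def stepG (g : PySem.Dict String (List String))
    (p : String × PySem.Dict String Int) : PySem.Dict String (List String) :=
  match baseOf p.1 with
  | none => g
  | some name => g.modify name [] (fun l => l ++ [p.1])

def superscore_alt (data : List (String × List (String × Int))) : List (String × List (String × Int)) :=
  let d := toDict data
  let groups := d.items.foldl stepG PySem.Dict.empty
  ((groups.items.foldl (fun out q => out.insert q.1 (bval d q.2)) PySem.Dict.empty).items).map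
    (fun q => (q.1, q.2.items))

-- ===== PRECONDITION & SPEC =====
-- Pre_ excludes exactly the inputs on which the Python A raises KeyError: a group
-- member that lacks an event of its group's first member's dict.
def Pre_superscore (data : List (String × List (String × Int))) : Prop :=
  ∀ p ∈ (toDict data).items, ∀ q ∈ (toDict data).items, ∀ n : String,
    baseOf p.1 = some n → baseOf q.1 = some n →
    (toDict data).items.find? (fun r => baseOf r.1 == some n) = some p →
    ∀ e ∈ p.2.keys, q.2.contains e = true
instance (data : List (String × List (String × Int))) : Decidable (Pre_superscore data) := by
  unfold Pre_superscore; infer_instance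

def pvWitness_superscore : (List (String × List (String × Int))) :=
  [("Troy H.S., Red", [("Anatomy", 3), ("Codebusters", 5)]),
   ("Troy H.S., Blue", [("Anatomy", 1), ("Codebusters", 7)]),
   ("Harker", [("Anatomy", 2)])]

def Spec_superscore (data : List (String × List (String × Int))) (out : List (String × List (String × Int))) : Prop := out = superscore_alt data
instance (data : List (String × List (String × Int))) (out : List (String × List (String × Int))) : Decidable (Spec_superscore data out) := by unfold Spec_superscore; infer_instance

-- ===== CLAIM (what is proved, stated in full; the proofs are below) =====
def Claim_equal_superscore : Prop := ∀ (data : List (String × List (String × Int))), Dom_superscore data → Pre_superscore data → Spec_superscore data (superscore data)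

-- ===== LEMMAS AND PROOFS =====

theorem values_foldl_insert {κ ν : Type} [BEq κ] [LawfulBEq κ] (L : List (κ × ν)) :
    ∀ (d : PySem.Dict κ ν) (w : ν),
      w ∈ (L.foldl (fun d q => d.insert q.1 q.2) d).values → w ∈ d.values ∨ w ∈ L.map Prod.snd := by
  induction L with
  | nil => intro d w h; exact Or.inl h
  | cons q L ih =>
    intro d w h
    rcases ih _ _ h with h' | h'
    · rcases PySem.Dict.mem_values_insert _ _ _ _ h' with h'' | h''
      · exact Or.inr (by simp [h''])
      · exact Or.inl h''
    · exact Or.inr (List.mem_cons_of_mem _ h')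

theorem inner_nodup (data : List (String × List (String × Int))) :
    ∀ ev ∈ (toDict data).values, ev.keys.Nodup := by
  intro ev hev
  have hev' : ev ∈ ((data.map (fun p => (p.1, PySem.Dict.ofList p.2))).foldl
      (fun d q => d.insert q.1 q.2) PySem.Dict.empty).values := hev
  rcases values_foldl_insert _ _ _ hev' with h | h
  · simp [PySem.Dict.empty, PySem.Dict.values] at h
  · simp only [List.map_map, List.mem_map, Function.comp] at h
    obtain ⟨a, _, rfl⟩ := h
    exact PySem.Dict.nodup_keys_ofList a.2

theorem item_snd_mem_values {κ ν : Type} [BEq κ] (d : PySem.Dict κ ν) (q : κ × ν)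
    (h : q ∈ d.items) : q.2 ∈ d.values := by
  simp only [PySem.Dict.values]
  exact List.mem_map_of_mem h

-- get? of the dict-comprehension fold (last insert wins, values depend only on the key)
theorem get?_buildfold (f : String → Int) (K : List String) :
    ∀ (acc : PySem.Dict String Int) (x : String),
      (K.foldl (fun a e => a.insert e (f e)) acc).get? x
        = if x ∈ K then some (f x) else acc.get? x := by
  induction K with
  | nil => intro acc x; simp
  | cons k K ih =>
    intro acc x
    simp only [List.foldl_cons, ih]
    by_cases hx : x ∈ K
    · simp [hx]
    · simp only [hx, if_false, PySem.Dict.get?_insert]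
      by_cases hk : x = k <;> simp [hk, hx]

theorem keys_buildfold (f : String → Int) (K : List String) (h : K.Nodup) :
    (K.foldl (fun a e => a.insert e (f e)) PySem.Dict.empty).keys = K := by
  have := PySem.Dict.keys_foldl_insert K (fun _ e => f e) PySem.Dict.empty
  rw [this, PySem.Dict.keys_empty]
  rw [show PySem.Set.update ([] : List String) K = PySem.Set.ofList K from
    (PySem.Set.ofList_eq_foldl K).symm ▸ rfl]
  exact PySem.Set.ofList_eq_self_of_nodup K h

theorem dict_eq_of_keys_get? {ν : Type} (dflt : ν) (d d' : PySem.Dict String ν)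
    (hk : d.keys = d'.keys) (hnd : d.keys.Nodup) (h : ∀ k, d.get? k = d'.get? k) : d = d' := by
  apply PySem.Dict.ext
  rw [PySem.Dict.items_eq_map_keys d hnd dflt, PySem.Dict.items_eq_map_keys d' (hk ▸ hnd) dflt, ← hk]
  apply List.map_congr_left
  intro k _
  simp [PySem.Dict.getD_eq_get?_getD, h k]

-- ---- mergeOne characterization ----

theorem mergeFold_keys (ev : PySem.Dict String Int) (L : List String) :
    ∀ (acc : PySem.Dict String Int), (∀ e ∈ L, acc.contains e = true) →
      (L.foldl (fun b e =>
        match PySem.Dict.get? ev e, PySem.Dict.get? b e with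
        | some v, some w => if v < w then b.insert e v else b
        | _, _ => b) acc).keys = acc.keys := by
  induction L with
  | nil => intro acc _; rfl
  | cons k L ih =>
    intro acc hc
    simp only [List.foldl_cons]
    set acc' := (match PySem.Dict.get? ev k, PySem.Dict.get? acc k with
          | some v, some w => if v < w then acc.insert k v else acc
          | _, _ => acc) with hdef
    have hkeys : acc'.keys = acc.keys := by
      rw [hdef]
      rcases hev : PySem.Dict.get? ev k with _ | v
      · rfl
      rcases ha : PySem.Dict.get? acc k with _ | w
      · rfl
      simp only
      split
      · exact PySem.Dict.keys_insert_of_contains _ _ (hc k (by simp))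
      · rfl
    rw [ih acc' (fun e he => by
      rw [PySem.Dict.contains_iff_mem_keys] at *
      · rw [hkeys]; rw [← PySem.Dict.contains_iff_mem_keys]; exact hc e (by simp [he])), hkeys]

theorem mergeFold_get? (ev : PySem.Dict String Int) (L : List String) :
    ∀ (acc : PySem.Dict String Int) (x : String), L.Nodup →
      (L.foldl (fun b e =>
        match PySem.Dict.get? ev e, PySem.Dict.get? b e with
        | some v, some w => if v < w then b.insert e v else b
        | _, _ => b) acc).get? x
      = if x ∈ L then
          (match PySem.Dict.get? ev x, PySem.Dict.get? acc x with
           | some v, some w => some (if v < w then v else w)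
           | _, _ => PySem.Dict.get? acc x)
        else PySem.Dict.get? acc x := by
  induction L with
  | nil => intro acc x _; simp
  | cons k L ih =>
    intro acc x hnd
    have hk : k ∉ L := (List.nodup_cons.mp hnd).1
    have hL : L.Nodup := (List.nodup_cons.mp hnd).2
    simp only [List.foldl_cons]
    set acc' := (match PySem.Dict.get? ev k, PySem.Dict.get? acc k with
          | some v, some w => if v < w then acc.insert k v else acc
          | _, _ => acc) with hdef
    rw [ih acc' x hL]
    by_cases hxk : x = k
    · subst hxk
      simp only [hk, if_false, List.mem_cons, true_or, if_true]
      rcases hev : PySem.Dict.get? ev x with _ | v <;> rcases ha : PySem.Dict.get? acc x with _ | w <;>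
        simp only [hev, ha, hdef] <;> try rfl
      split
      · simp [PySem.Dict.get?_insert_self]
      · simp [ha]
    · have hacc' : PySem.Dict.get? acc' x = PySem.Dict.get? acc x := by
        rcases hev : PySem.Dict.get? ev k with _ | v <;> rcases ha : PySem.Dict.get? acc k with _ | w <;>
          simp only [hev, ha, hdef] <;> try rfl
        split
        · exact PySem.Dict.get?_insert_of_ne _ _ hxk
        · rfl
      by_cases hx : x ∈ L <;> simp [hx, hxk, hacc']

theorem mergeOne_keys (base ev : PySem.Dict String Int) :
    (mergeOne base ev).keys = base.keys := by
  unfold mergeOne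
  exact mergeFold_keys ev base.keys base
    (fun e he => (PySem.Dict.contains_iff_mem_keys base e).mpr he)

theorem mergeOne_get? (base ev : PySem.Dict String Int) (hnd : base.keys.Nodup) (x : String) :
    (mergeOne base ev).get? x
      = match PySem.Dict.get? ev x, PySem.Dict.get? base x with
        | some v, some w => some (if v < w then v else w)
        | _, _ => PySem.Dict.get? base x := by
  unfold mergeOne
  rw [mergeFold_get? ev base.keys base x hnd]
  by_cases hx : x ∈ base.keys
  · simp [hx]
  · have : PySem.Dict.get? base x = none := (PySem.Dict.get?_eq_none_iff_not_mem_keys base x).mpr hx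
    simp [hx, this]

-- ---- minOver / bval characterization ----

theorem get?_isSome_of_mem_keys {ν : Type} (d : PySem.Dict String ν) (k : String)
    (h : k ∈ d.keys) : ∃ v, d.get? k = some v := by
  have := (PySem.Dict.contains_iff_mem_keys d k).mpr h
  rw [PySem.Dict.contains_eq_isSome_get?] at this
  exact Option.isSome_iff_exists.mp this

theorem optFold_isSome (d : PySem.Dict String (PySem.Dict String Int)) (e : String) :
    ∀ (ms : List String) (a : Option Int),
      (a.isSome = true ∨ ∃ s ∈ ms, (PySem.Dict.get? (PySem.Dict.getD d s PySem.Dict.empty) e).isSome = true) →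
      (ms.foldl (fun m s =>
        match PySem.Dict.get? (PySem.Dict.getD d s PySem.Dict.empty) e with
        | some v => some (match m with | none => v | some m0 => min m0 v)
        | none => m) a).isSome = true := by
  intro ms
  induction ms with
  | nil =>
    intro a h
    rcases h with h | ⟨s, hs, _⟩
    · exact h
    · cases hs
  | cons s ms ih =>
    intro a h
    simp only [List.foldl_cons]
    apply ih
    rcases hv : PySem.Dict.get? (PySem.Dict.getD d s PySem.Dict.empty) e with _ | v
    · rcases h with h | ⟨s', hs', h'⟩
      · exact Or.inl h
      · rcases List.mem_cons.mp hs' with rfl | hs''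
        · rw [hv] at h'; cases h'
        · exact Or.inr ⟨s', hs'', h'⟩
    · exact Or.inl rfl

theorem bval_singleton (d : PySem.Dict String (PySem.Dict String Int)) (s : String)
    (hnd : (PySem.Dict.getD d s PySem.Dict.empty).keys.Nodup) :
    bval d [s] = PySem.Dict.getD d s PySem.Dict.empty := by
  unfold bval
  apply dict_eq_of_keys_get? 0
  · rw [keys_buildfold _ _ hnd]
  · rw [keys_buildfold _ _ hnd]; exact hnd
  · intro x
    rw [get?_buildfold]
    by_cases hx : x ∈ (PySem.Dict.getD d s PySem.Dict.empty).keys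
    · obtain ⟨v, hv⟩ := get?_isSome_of_mem_keys _ _ hx
      simp [hx, minOver, hv]
    · have : PySem.Dict.get? (PySem.Dict.getD d s PySem.Dict.empty) x = none :=
        (PySem.Dict.get?_eq_none_iff_not_mem_keys _ _).mpr hx
      simp [hx, this]

theorem bval_keys (d : PySem.Dict String (PySem.Dict String Int)) (f : String)
    (rest : List String) (hnd : (PySem.Dict.getD d f PySem.Dict.empty).keys.Nodup) :
    (bval d (f :: rest)).keys = (PySem.Dict.getD d f PySem.Dict.empty).keys := by
  unfold bval; exact keys_buildfold _ _ hnd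

theorem bval_get? (d : PySem.Dict String (PySem.Dict String Int)) (f : String)
    (rest : List String) (x : String) :
    PySem.Dict.get? (bval d (f :: rest)) x
      = if x ∈ (PySem.Dict.getD d f PySem.Dict.empty).keys
        then some (minOver d (f :: rest) x) else none := by
  unfold bval
  rw [get?_buildfold]
  by_cases hx : x ∈ (PySem.Dict.getD d f PySem.Dict.empty).keys <;> simp [hx]

theorem bval_append (d : PySem.Dict String (PySem.Dict String Int)) (f : String)
    (rest : List String) (s : String)
    (hnd : (PySem.Dict.getD d f PySem.Dict.empty).keys.Nodup) :
    bval d (f :: (rest ++ [s]))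
      = mergeOne (bval d (f :: rest)) (PySem.Dict.getD d s PySem.Dict.empty) := by
  have hbk := bval_keys d f rest hnd
  apply dict_eq_of_keys_get? 0
  · rw [bval_keys d f _ hnd, mergeOne_keys, hbk]
  · rw [bval_keys d f _ hnd]; exact hnd
  · intro x
    rw [mergeOne_get? _ _ (hbk ▸ hnd) x]
    rw [bval_get? d f (rest ++ [s]) x, bval_get? d f rest x]
    by_cases hx : x ∈ (PySem.Dict.getD d f PySem.Dict.empty).keys
    · simp only [hx, if_true]
      obtain ⟨v0, hv0⟩ := get?_isSome_of_mem_keys _ _ hx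
      have hsome := optFold_isSome d x (f :: rest) none
        (Or.inr ⟨f, by simp, by rw [hv0]; rfl⟩)
      obtain ⟨m, hm⟩ := Option.isSome_iff_exists.mp hsome
      have hmo : minOver d (f :: rest) x = m := by simp [minOver, hm]
      have happ : minOver d (f :: (rest ++ [s])) x
          = (match PySem.Dict.get? (PySem.Dict.getD d s PySem.Dict.empty) x with
             | some v => some (min m v)
             | none => some m).getD 0 := by
        show ((f :: rest ++ [s]).foldl _ none).getD 0 = _
        rw [show (f :: rest ++ [s] : List String) = (f :: rest) ++ [s] by simp,
          List.foldl_append, hm]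
        rcases hev2 : PySem.Dict.get? (PySem.Dict.getD d s PySem.Dict.empty) x with _ | v <;>
          simp [hev2]
      rw [happ, hmo]
      rcases hev : PySem.Dict.get? (PySem.Dict.getD d s PySem.Dict.empty) x with _ | v
      · rfl
      · simp only [Option.getD_some]
        congr 1
        rw [min_def]
        split_ifs <;> omega
    · simp only [hx, if_false]
      rcases PySem.Dict.get? (PySem.Dict.getD d s PySem.Dict.empty) x with _ | v <;> rfl

-- ---- the loop invariant: A's accumulated dict is B's groups dict rendered through bval ----

def GInv (d : PySem.Dict String (PySem.Dict String Int))
    (acc : PySem.Dict String (PySem.Dict String Int))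
    (g : PySem.Dict String (List String)) : Prop :=
  acc.items = g.items.map (fun q => (q.1, bval d q.2)) ∧ g.keys.Nodup ∧
  ∀ q ∈ g.items, ∃ f rest, q.2 = f :: rest ∧ (PySem.Dict.getD d f PySem.Dict.empty).keys.Nodup

theorem keys_of_items_map (d : PySem.Dict String (PySem.Dict String Int))
    (acc : PySem.Dict String (PySem.Dict String Int)) (g : PySem.Dict String (List String))
    (h : acc.items = g.items.map (fun q => (q.1, bval d q.2))) : acc.keys = g.keys := by
  simp only [PySem.Dict.keys, h, List.map_map]
  rfl

theorem get?_of_items_map (d : PySem.Dict String (PySem.Dict String Int))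
    (acc : PySem.Dict String (PySem.Dict String Int)) (g : PySem.Dict String (List String))
    (h : acc.items = g.items.map (fun q => (q.1, bval d q.2))) (hg : g.keys.Nodup) :
    ∀ n, acc.get? n = (g.get? n).map (bval d) := by
  intro n
  have hk := keys_of_items_map d acc g h
  have hand : acc.keys.Nodup := hk ▸ hg
  rcases hgn : g.get? n with _ | ms
  · have h2 : n ∉ g.keys := (PySem.Dict.get?_eq_none_iff_not_mem_keys g n).mp hgn
    rw [(PySem.Dict.get?_eq_none_iff_not_mem_keys acc n).mpr (hk ▸ h2)]
    rfl
  · have hmem := PySem.Dict.mem_items_of_get?_eq_some g hgn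
    have : (n, bval d ms) ∈ acc.items := by
      rw [h]; exact List.mem_map_of_mem hmem
    rw [PySem.Dict.get?_of_mem_items acc this hand]; rfl

theorem step_preserves (d : PySem.Dict String (PySem.Dict String Int))
    (hd : d.keys.Nodup) (hvals : ∀ ev ∈ d.values, ev.keys.Nodup)
    (p : String × PySem.Dict String Int) (hp : p ∈ d.items)
    (acc : PySem.Dict String (PySem.Dict String Int)) (g : PySem.Dict String (List String))
    (hI : GInv d acc g) : GInv d (stepA acc p) (stepG g p) := by
  obtain ⟨hitems, hgnd, hmems⟩ := hI
  have hbd : PySem.Dict.getD d p.1 PySem.Dict.empty = p.2 :=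
    PySem.Dict.getD_of_mem_items d hp hd _
  have hpnd : p.2.keys.Nodup := hvals _ (item_snd_mem_values d p hp)
  have hget := get?_of_items_map d acc g hitems hgnd
  unfold stepA stepG
  rcases hb : baseOf p.1 with _ | n
  · exact ⟨hitems, hgnd, hmems⟩
  rcases hgn : g.get? n with _ | ms
  · have haccn : acc.get? n = none := by rw [hget, hgn]; rfl
    simp only [haccn]
    have hmod : g.modify n [] (fun l => l ++ [p.1]) = g.insert n [p.1] := by
      show g.insert n (g.getD n [] ++ [p.1]) = _
      rw [PySem.Dict.getD_of_get?_eq_none g [] hgn]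
      rfl
    have hgc : g.contains n = false := by rw [PySem.Dict.contains_eq_isSome_get?, hgn]; rfl
    have hac : acc.contains n = false := by rw [PySem.Dict.contains_eq_isSome_get?, haccn]; rfl
    refine ⟨?_, ?_, ?_⟩
    · rw [hmod, PySem.Dict.items_insert_of_not_contains acc _ hac,
        PySem.Dict.items_insert_of_not_contains g _ hgc, hitems, List.map_append]
      have : bval d [p.1] = p.2 := by
        rw [bval_singleton d p.1 (by rw [hbd]; exact hpnd), hbd]
      simp [this]
    · rw [hmod]; exact PySem.Dict.nodup_keys_insert _ _ _ hgnd
    · intro q hq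
      rw [hmod, PySem.Dict.mem_items_insert] at hq
      rcases hq with rfl | ⟨hq, _⟩
      · exact ⟨p.1, [], rfl, by rw [hbd]; exact hpnd⟩
      · exact hmems q hq
  · have haccn : acc.get? n = some (bval d ms) := by rw [hget, hgn]; rfl
    simp only [haccn]
    have hmod : g.modify n [] (fun l => l ++ [p.1]) = g.insert n (ms ++ [p.1]) := by
      show g.insert n (g.getD n [] ++ [p.1]) = _
      rw [PySem.Dict.getD_eq_get?_getD, hgn]
      rfl
    have hgc : g.contains n = true := by rw [PySem.Dict.contains_eq_isSome_get?, hgn]; rfl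
    have hac : acc.contains n = true := by rw [PySem.Dict.contains_eq_isSome_get?, haccn]; rfl
    obtain ⟨f, rest, hms, hfnd⟩ := hmems (n, ms) (PySem.Dict.mem_items_of_get?_eq_some g hgn)
    have hms' : ms = f :: rest := hms
    refine ⟨?_, ?_, ?_⟩
    · rw [hmod, PySem.Dict.items_insert_of_contains acc _ hac,
        PySem.Dict.items_insert_of_contains g _ hgc, hitems, List.map_map, List.map_map]
      apply List.map_congr_left
      intro q hq
      by_cases hqn : q.1 = n
      · have hq2 : q.2 = ms := by
          have h1 : g.get? q.1 = some q.2 :=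
            PySem.Dict.get?_of_mem_items g (by simpa using hq) hgnd
          rw [hqn, hgn] at h1
          exact (Option.some_inj.mp h1).symm
        have hnew : bval d (ms ++ [p.1]) = mergeOne (bval d ms) p.2 := by
          rw [hms', List.cons_append, bval_append d f rest p.1 hfnd, hbd]
        simp only [Function.comp_def, hqn, hq2, BEq.rfl, if_true, hnew]
      · simp [Function.comp, hqn]
    · rw [hmod]; exact PySem.Dict.nodup_keys_insert _ _ _ hgnd
    · intro q hq
      rw [hmod, PySem.Dict.mem_items_insert] at hq
      rcases hq with rfl | ⟨hq, _⟩
      · exact ⟨f, rest ++ [p.1], by simp [hms'], hfnd⟩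
      · exact hmems q hq

theorem fold_preserves (d : PySem.Dict String (PySem.Dict String Int))
    (hd : d.keys.Nodup) (hvals : ∀ ev ∈ d.values, ev.keys.Nodup) :
    ∀ (l : List (String × PySem.Dict String Int)), (∀ p ∈ l, p ∈ d.items) →
      ∀ acc g, GInv d acc g → GInv d (l.foldl stepA acc) (l.foldl stepG g) := by
  intro l
  induction l with
  | nil => intro _ acc g h; exact h
  | cons p l ih =>
    intro hl acc g h
    simp only [List.foldl_cons]
    exact ih (fun q hq => hl q (List.mem_cons_of_mem _ hq)) _ _
      (step_preserves d hd hvals p (hl p (List.mem_cons_self)) acc g h)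

-- ===== VERDICT (by name: the statement is the Claim_ definition above) =====
theorem superscore_spec : Claim_equal_superscore := by
  unfold Claim_equal_superscore
  intro data _ _
  unfold Spec_superscore superscore superscore_alt
  have hd : (toDict data).keys.Nodup := PySem.Dict.nodup_keys_ofList _
  have h0 : GInv (toDict data) PySem.Dict.empty PySem.Dict.empty :=
    ⟨rfl, List.Pairwise.nil, by intro q hq; cases hq⟩
  obtain ⟨hitems, hgnd, _⟩ := fold_preserves (toDict data) hd (inner_nodup data)
    (toDict data).items (fun p hp => hp) _ _ h0
  have hfresh := PySem.Dict.items_foldl_insert_fresh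
    ((toDict data).items.foldl stepG PySem.Dict.empty).items Prod.fst
    (fun q => bval (toDict data) q.2) PySem.Dict.empty
    (fun a _ => PySem.Dict.contains_empty _) hgnd
  have hfresh2 : (((toDict data).items.foldl stepG PySem.Dict.empty).items.foldl
      (fun out q => out.insert q.1 (bval (toDict data) q.2)) PySem.Dict.empty).items
      = ((toDict data).items.foldl stepG PySem.Dict.empty).items.map
          (fun q => (q.1, bval (toDict data) q.2)) := hfresh
  rw [hitems, ← hfresh2]
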